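-- pv_equiv track=rewrite | github.com/NixOS/nixpkgs | pkgs/build-support/references-by-popularity/closure-graph.py | order_by_popularity
-- ===== SOURCE A (Python) =====
-- from collections import defaultdict
--
-- def order_by_popularity(paths):
--     paths_by_popularity = defaultdict(list)
--     popularities = []
--     for path, popularity in paths.items():
--         popularities.append(popularity)
--         paths_by_popularity[popularity].append(path)
--
--     popularities = list(set(popularities))
--     popularities.sort()
--
--     flat_ordered = []
--     for popularity in popularities:
--         paths = paths_by_popularity[popularity]
--         paths.sort(key=package_name)
--
--         flat_ordered.extend(reversed(paths))
--     return list(reversed(flat_ordered))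
--
-- def package_name(path):
--     parts = path.split('-')
--     start = parts.pop(0)
--     # don't throw away any data, so the order is always the same.
--     # even in cases where only the hash at the start has changed.
--     parts.append(start)
--     return '-'.join(parts)
-- ===== SOURCE B (Python) =====
-- def order_by_popularity(paths):
--     ordered = sorted(paths.keys(), key=package_name)
--     ordered.sort(key=lambda p: paths[p], reverse=True)
--     return ordered
--
-- def package_name(path):
--     parts = path.split('-')
--     start = parts.pop(0)
--     parts.append(start)
--     return '-'.join(parts)
-- ===== Notes on version B (the rewrite author's own statement) =====
-- stated objective: simpler
-- what changed: A buckets paths into a popularity-keyed defaultdict, sorts each bucket by package name, concatenates reversed buckets over ascending popularities and reverses the whole list; B drops the bucketing entirely and does two stable sorts of the key list (by package_name ascending, then by popularity with reverse=True).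
import Mathlib
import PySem

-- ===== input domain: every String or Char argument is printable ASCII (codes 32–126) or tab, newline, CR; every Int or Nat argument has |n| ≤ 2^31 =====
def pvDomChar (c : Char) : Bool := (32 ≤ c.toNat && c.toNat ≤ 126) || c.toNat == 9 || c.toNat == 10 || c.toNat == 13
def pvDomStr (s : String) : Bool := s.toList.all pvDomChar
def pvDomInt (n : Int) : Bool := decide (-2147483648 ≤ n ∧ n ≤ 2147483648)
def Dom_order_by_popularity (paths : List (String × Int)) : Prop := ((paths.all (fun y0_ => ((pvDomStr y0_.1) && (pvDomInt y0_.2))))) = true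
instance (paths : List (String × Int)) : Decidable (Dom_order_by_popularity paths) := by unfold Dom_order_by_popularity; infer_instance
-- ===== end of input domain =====

-- B replaces A's popularity-bucketing, per-bucket sorts and double reversal by two stable sorts
-- (by package name, then by popularity with reverse=True); same output, simpler decomposition.

-- ===== PORT A =====
-- shared module helper `package_name` (identical in both Pythons): split on '-', move the first piece to the end, rejoin.
-- path.split('-') always returns at least one piece, so parts.pop(0) never raises (headD's default is unreachable).
def packageName (path : String) : String :=
  let parts := PySem.Chars.splitOn path.toList ['-']
  String.ofList (PySem.Chars.join ['-'] (parts.drop 1 ++ [parts.headD []]))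

def order_by_popularity (paths : List (String × Int)) : List String :=
  -- the dict argument, built from the association list (Python dict semantics)
  let d : PySem.Dict String Int := paths.foldl (fun d p => d.insert p.1 p.2) PySem.Dict.empty
  -- one loop appending to `popularities` and to the defaultdict bucket
  let st := d.items.foldl
    (fun (st : List Int × PySem.Dict Int (List String)) pp =>
      (st.1 ++ [pp.2], st.2.modify pp.2 [] (· ++ [pp.1])))
    ([], PySem.Dict.empty)
  let popularities := PySem.List.sorted (PySem.Set.ofList st.1) (fun x => x)
  let flat_ordered := popularities.foldl
    (fun acc popularity =>
      acc ++ (PySem.List.sorted (st.2.getD popularity []) packageName).reverse) []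
  flat_ordered.reverse

-- ===== PORT B =====
def order_by_popularity_alt (paths : List (String × Int)) : List String :=
  let d : PySem.Dict String Int := paths.foldl (fun d p => d.insert p.1 p.2) PySem.Dict.empty
  let ordered := PySem.List.sorted d.keys packageName
  -- ordered.sort(key=lambda p: paths[p], reverse=True); p is always a key of d, so the lookup never raises
  PySem.List.sorted ordered (fun p => d.getD p 0) true

-- ===== PRECONDITION & SPEC =====
def Spec_order_by_popularity (paths : List (String × Int)) (out : List String) : Prop := out = order_by_popularity_alt paths
instance (paths : List (String × Int)) (out : List String) : Decidable (Spec_order_by_popularity paths out) := by unfold Spec_order_by_popularity; infer_instance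

-- ===== CLAIM (what is proved, stated in full; the proofs are below) =====
def Claim_equal_order_by_popularity : Prop := ∀ (paths : List (String × Int)), Dom_order_by_popularity paths → Spec_order_by_popularity paths (order_by_popularity paths)

-- ===== LEMMAS AND PROOFS =====

theorem insertBy_append_left {α : Type} (before : α → α → Bool) (x : α) (l r : List α)
    (h : ∀ y ∈ l, before x y = false) :
    PySem.List.insertBy before x (l ++ r) = l ++ PySem.List.insertBy before x r := by
  induction l with
  | nil => simp
  | cons y l ih =>
    have hy := h y (by simp)
    simp [PySem.List.insertBy, hy, ih (fun y hy => h y (by simp [hy]))]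

theorem insertBy_front {α : Type} (before : α → α → Bool) (x : α) (r : List α)
    (h : ∀ y ∈ r, before x y = true) :
    PySem.List.insertBy before x r = x :: r := by
  cases r with
  | nil => simp [PySem.List.insertBy]
  | cons y r => simp [PySem.List.insertBy, h y (by simp)]

theorem lt_ext (V W : List Int) (hV : V.Pairwise (· < ·)) (hW : W.Pairwise (· < ·))
    (hm : ∀ v, v ∈ V ↔ v ∈ W) : V = W := by
  induction V generalizing W with
  | nil => cases W with
    | nil => rfl
    | cons w W => exact absurd ((hm w).2 (by simp)) (by simp)
  | cons v V ih =>
    cases W with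
    | nil => exact absurd ((hm v).1 (by simp)) (by simp)
    | cons w W =>
      have hVp := (List.pairwise_cons.1 hV)
      have hWp := (List.pairwise_cons.1 hW)
      have hvw : v = w := by
        have h1 := (hm v).1 (by simp)
        have h2 := (hm w).2 (by simp)
        rcases List.mem_cons.1 h1 with h | h
        · exact h
        · rcases List.mem_cons.1 h2 with h' | h'
          · omega
          · have := hWp.1 v h
            have := hVp.1 w h'
            omega
      subst hvw
      have : V = W := by
        refine ih W hVp.2 hWp.2 ?_
        intro u
        constructor
        · intro hu
          rcases List.mem_cons.1 ((hm u).1 (by simp [hu])) with h | h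
          · exact absurd h (by have := hVp.1 u hu; omega)
          · exact h
        · intro hu
          rcases List.mem_cons.1 ((hm u).2 (by simp [hu])) with h | h
          · exact absurd h (by have := hWp.1 u hu; omega)
          · exact h
      rw [this]

theorem gt_ext (V W : List Int) (hV : V.Pairwise (fun a b => b < a)) (hW : W.Pairwise (fun a b => b < a))
    (hm : ∀ v, v ∈ V ↔ v ∈ W) : V = W := by
  have := lt_ext V.reverse W.reverse (by simpa [List.pairwise_reverse] using hV)
    (by simpa [List.pairwise_reverse] using hW) (by simpa using hm)
  simpa using congrArg List.reverse this

theorem flatMap_congr_mem {α β : Type} (l : List α) (f g : α → List β)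
    (h : ∀ x ∈ l, f x = g x) : l.flatMap f = l.flatMap g := by
  simp only [List.flatMap_def]
  rw [List.map_congr_left h]

theorem insert_desc_blocks {α : Type} (key : α → Int) (x : α) (V : List Int) (f : Int → List α)
    (hV : V.Pairwise (fun a b => b < a)) (hf : ∀ v, ∀ y ∈ f v, key y = v)
    (hmem : key x ∈ V ∨ f (key x) = []) :
    PySem.List.insertBy (fun a b => decide (key b < key a)) x (V.flatMap f)
      = (V.filter (fun v => key x < v)).flatMap f ++ (f (key x) ++ [x])
        ++ (V.filter (fun v => v < key x)).flatMap f := by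
  induction V with
  | nil =>
    rcases hmem with h | h
    · simp at h
    · simp [h, PySem.List.insertBy]
  | cons v V ih =>
    have hVp := List.pairwise_cons.1 hV
    rcases lt_trichotomy (key x) v with hlt | heq | hgt
    · have hpass : ∀ y ∈ f v, (decide (key y < key x) : Bool) = false := by
        intro y hy
        have := hf v y hy
        simp [this]; omega
      have hmem' : key x ∈ V ∨ f (key x) = [] := by
        rcases hmem with h | h
        · rcases List.mem_cons.1 h with h' | h'
          · omega
          · exact Or.inl h'
        · exact Or.inr h
      rw [List.flatMap_cons, insertBy_append_left _ _ _ _ hpass, ih hVp.2 hmem']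
      simp only [List.filter_cons]
      have h1 : (decide (key x < v) : Bool) = true := by simp [hlt]
      have h2 : (decide (v < key x) : Bool) = false := by simp; omega
      simp [h1, h2, List.flatMap_cons]
    · subst heq
      have hpass : ∀ y ∈ f (key x), (decide (key y < key x) : Bool) = false := by
        intro y hy
        have := hf (key x) y hy
        simp [this]
      have hfront : ∀ y ∈ V.flatMap f, (decide (key y < key x) : Bool) = true := by
        intro y hy
        rcases List.mem_flatMap.1 hy with ⟨w, hw, hyw⟩
        have := hf w y hyw
        have := hVp.1 w hw
        simp [hf w y hyw]; omega
      rw [List.flatMap_cons, insertBy_append_left _ _ _ _ hpass, insertBy_front _ _ _ hfront]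
      have h1 : (decide (key x < key x) : Bool) = false := by simp
      have hfil1 : V.filter (fun v => decide (key x < v)) = [] := by
        apply List.filter_eq_nil_iff.2
        intro w hw
        have := hVp.1 w hw
        simp; omega
      have hfil2 : V.filter (fun v => decide (v < key x)) = V := by
        apply List.filter_eq_self.2
        intro w hw
        have := hVp.1 w hw
        simp; omega
      simp [List.filter_cons, h1, hfil1, hfil2]
    · have hfront : ∀ y ∈ (v :: V).flatMap f, (decide (key y < key x) : Bool) = true := by
        intro y hy
        rcases List.mem_flatMap.1 hy with ⟨w, hw, hyw⟩
        rcases List.mem_cons.1 hw with h' | h'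
        · subst h'; simp [hf w y hyw]; omega
        · have := hVp.1 w h'
          simp [hf w y hyw]; omega
      rw [insertBy_front _ _ _ hfront]
      have hfx : f (key x) = [] := by
        rcases hmem with h | h
        · rcases List.mem_cons.1 h with h' | h'
          · omega
          · have := hVp.1 _ h'; omega
        · exact h
      have hfil1 : (v :: V).filter (fun w => decide (key x < w)) = [] := by
        apply List.filter_eq_nil_iff.2
        intro w hw
        rcases List.mem_cons.1 hw with h' | h'
        · subst h'; simp; omega
        · have := hVp.1 w h'; simp; omega
      have hfil2 : (v :: V).filter (fun w => decide (w < key x)) = v :: V := by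
        apply List.filter_eq_self.2
        intro w hw
        rcases List.mem_cons.1 hw with h' | h'
        · subst h'; simp; omega
        · have := hVp.1 w h'; simp; omega
      simp [hfil1, hfil2, hfx]

theorem sorted_rev_eq_blocks {α : Type} (xs : List α) (key : α → Int) :
    PySem.List.sorted xs key true
      = ((PySem.List.sorted (PySem.Set.ofList (xs.map key)) (fun v => v)).reverse).flatMap
          (fun v => xs.filter (fun y => key y == v)) := by
  induction xs using List.reverseRecOn with
  | nil => simp [PySem.List.sorted, PySem.Set.ofList]
  | append_singleton xs x ih =>
    have hstep : PySem.List.sorted (xs ++ [x]) key true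
        = PySem.List.insertBy (fun a b => decide (key b < key a)) x (PySem.List.sorted xs key true) := by
      rw [PySem.List.sorted_rev_eq_foldl_insertBy, PySem.List.sorted_rev_eq_foldl_insertBy,
        List.foldl_append]
      rfl
    set V := (PySem.List.sorted (PySem.Set.ofList (xs.map key)) (fun v => v)).reverse with hVdef
    set f : Int → List α := fun v => xs.filter (fun y => key y == v) with hfdef
    have hmemV : ∀ w, w ∈ V ↔ w ∈ xs.map key := by
      intro w
      simp [hVdef, PySem.List.mem_sorted, PySem.Set.mem_ofList]
    have hV : V.Pairwise (fun a b => b < a) := by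
      rw [hVdef, List.pairwise_reverse]
      exact PySem.List.sorted_ofList_pairwise_lt _
    have hf : ∀ v, ∀ y ∈ f v, key y = v := by
      intro v y hy
      simpa using (List.mem_filter.1 hy).2
    have hmem : key x ∈ V ∨ f (key x) = [] := by
      by_cases h : key x ∈ V
      · exact Or.inl h
      · refine Or.inr (List.filter_eq_nil_iff.2 ?_)
        intro y hy
        intro hc
        exact h ((hmemV (key x)).2 (by
          have : key y = key x := by simpa using hc
          exact this ▸ List.mem_map_of_mem hy))
      
    rw [hstep, ih, insert_desc_blocks key x V f hV hf hmem]
    -- identify the new popularity list with the spliced one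
    set W := V.filter (fun v => key x < v) ++ key x :: V.filter (fun v => v < key x) with hWdef
    have hW : ((PySem.List.sorted (PySem.Set.ofList ((xs ++ [x]).map key)) (fun v => v)).reverse) = W := by
      apply gt_ext
      · rw [List.pairwise_reverse]
        exact PySem.List.sorted_ofList_pairwise_lt _
      · rw [hWdef]
        apply List.pairwise_append.2
        refine ⟨List.Pairwise.filter _ hV, ?_, ?_⟩
        · apply List.pairwise_cons.2
          refine ⟨?_, List.Pairwise.filter _ hV⟩
          intro w hw
          simpa using (List.mem_filter.1 hw).2
        · intro a ha b hb
          have ha' : key x < a := by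
            simpa using (List.mem_filter.1 ha).2
          rcases List.mem_cons.1 hb with h' | h'
          · omega
          · have hb' : b < key x := by
              simpa using (List.mem_filter.1 h').2
            omega
      · intro w
        have h1 : w ∈ (PySem.List.sorted (PySem.Set.ofList ((xs ++ [x]).map key)) (fun v => v)).reverse
            ↔ w ∈ xs.map key ∨ w = key x := by
          simp [PySem.List.mem_sorted, PySem.Set.mem_ofList, or_comm]
        rw [h1, hWdef]
        constructor
        · intro h
          rcases h with h | h
          · rcases lt_trichotomy w (key x) with hlt | heq | hgt
            · simp [List.mem_append, List.mem_filter, (hmemV w).2 h, hlt]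
            · simp [heq]
            · simp [List.mem_append, List.mem_filter, (hmemV w).2 h, hgt]
          · simp [h]
        · intro h
          rcases List.mem_append.1 h with h | h
          · exact Or.inl ((hmemV w).1 (List.mem_filter.1 h).1)
          · rcases List.mem_cons.1 h with h' | h'
            · exact Or.inr h'
            · exact Or.inl ((hmemV w).1 (List.mem_filter.1 h').1)
    rw [hW, hWdef]
    -- now expand the flatMap over the spliced list
    rw [List.flatMap_append, List.flatMap_cons]
    have hsplit : ∀ v : Int, (xs ++ [x]).filter (fun y => key y == v)
        = f v ++ if key x == v then [x] else [] := by
      intro v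
      rw [List.filter_append]
      simp [hfdef, List.filter_cons]
    have hc1 : (V.filter (fun v => key x < v)).flatMap (fun v => (xs ++ [x]).filter (fun y => key y == v))
        = (V.filter (fun v => key x < v)).flatMap f := by
      apply flatMap_congr_mem
      intro v hv
      have : key x < v := by
        simpa using (List.mem_filter.1 hv).2
      rw [hsplit]
      have : (key x == v) = false := by simp; omega
      simp [this]
    have hc2 : (V.filter (fun v => v < key x)).flatMap (fun v => (xs ++ [x]).filter (fun y => key y == v))
        = (V.filter (fun v => v < key x)).flatMap f := by
      apply flatMap_congr_mem
      intro v hv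
      have : v < key x := by
        simpa using (List.mem_filter.1 hv).2
      rw [hsplit]
      have : (key x == v) = false := by simp; omega
      simp [this]
    rw [hc1, hc2, hsplit (key x)]
    simp

theorem insertBy_cons_pos {α : Type} (before : α → α → Bool) (x y : α) (ys : List α)
    (h : before x y = true) :
    PySem.List.insertBy before x (y :: ys) = x :: y :: ys := by
  simp [PySem.List.insertBy, h]

theorem insertBy_cons_neg {α : Type} (before : α → α → Bool) (x y : α) (ys : List α)
    (h : before x y = false) :
    PySem.List.insertBy before x (y :: ys) = y :: PySem.List.insertBy before x ys := by
  simp [PySem.List.insertBy, h]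

theorem insertBy_filter {α : Type} (key : α → String) (p : α → Bool) (x : α) (ys : List α)
    (hys : ys.Pairwise (fun a b => key a ≤ key b)) :
    (PySem.List.insertBy (fun a b => decide (key a < key b)) x ys).filter p
      = if p x then PySem.List.insertBy (fun a b => decide (key a < key b)) x (ys.filter p)
        else ys.filter p := by
  induction ys with
  | nil => by_cases h : p x <;> simp [PySem.List.insertBy, h]
  | cons y ys ih =>
    have hp := List.pairwise_cons.1 hys
    by_cases hb : (decide (key x < key y) : Bool) = true
    · have hfrontfull : ∀ z ∈ (y :: ys).filter p, (decide (key x < key z) : Bool) = true := by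
        intro z hz
        have hz' := (List.mem_filter.1 hz).1
        rcases List.mem_cons.1 hz' with h' | h'
        · subst h'; exact hb
        · exact decide_eq_true (lt_of_lt_of_le (of_decide_eq_true hb) (hp.1 z h'))
      rw [insertBy_cons_pos _ _ _ _ hb]
      by_cases hpx : p x
      · rw [insertBy_front _ _ _ hfrontfull]
        simp [List.filter_cons, hpx]
      · simp [List.filter_cons, hpx]
    · rw [insertBy_cons_neg _ _ _ _ (by simpa using hb)]
      by_cases hpy : p y
      · have h1 : (y :: PySem.List.insertBy (fun a b => decide (key a < key b)) x ys).filter p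
            = y :: (PySem.List.insertBy (fun a b => decide (key a < key b)) x ys).filter p := by
          simp [List.filter_cons, hpy]
        have h2 : (y :: ys).filter p = y :: ys.filter p := by
          simp [List.filter_cons, hpy]
        by_cases hpx : p x
        · rw [h1, ih hp.2, if_pos hpx, if_pos hpx, h2,
            insertBy_cons_neg _ _ _ _ (by simpa using hb)]
        · rw [h1, ih hp.2, if_neg hpx, if_neg hpx, h2]
      · have h1 : (y :: PySem.List.insertBy (fun a b => decide (key a < key b)) x ys).filter p
            = (PySem.List.insertBy (fun a b => decide (key a < key b)) x ys).filter p := by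
          simp [List.filter_cons, hpy]
        have h2 : (y :: ys).filter p = ys.filter p := by
          simp [List.filter_cons, hpy]
        rw [h1, ih hp.2, h2]

theorem sorted_filter {α : Type} (xs : List α) (key : α → String) (p : α → Bool) :
    (PySem.List.sorted xs key).filter p = PySem.List.sorted (xs.filter p) key := by
  induction xs using List.reverseRecOn with
  | nil => simp [PySem.List.sorted]
  | append_singleton xs x ih =>
    have hstep : ∀ l : List α, PySem.List.sorted (l ++ [x]) key
        = PySem.List.insertBy (fun a b => decide (key a < key b)) x (PySem.List.sorted l key) := by
      intro l
      rw [PySem.List.sorted_eq_foldl_insertBy, PySem.List.sorted_eq_foldl_insertBy, List.foldl_append]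
      rfl
    rw [hstep, insertBy_filter key p x _ (PySem.List.sorted_pairwise xs key), ih, List.filter_append]
    by_cases hpx : p x
    · rw [if_pos hpx, show List.filter p [x] = [x] by simp [hpx], hstep]
    · rw [if_neg hpx, show List.filter p [x] = ([] : List α) by simp [hpx], List.append_nil]

-- the two ports compute the same list: A is "buckets of a descending popularity list, each
-- sorted by name"; B's reverse stable sort decomposes into exactly those blocks
theorem ports_eq (paths : List (String × Int)) :
    order_by_popularity paths = order_by_popularity_alt paths := by
  unfold order_by_popularity order_by_popularity_alt
  dsimp only
  set d : PySem.Dict String Int := paths.foldl (fun d p => d.insert p.1 p.2) PySem.Dict.empty with hd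
  have hnd : d.keys.Nodup := by
    rw [hd]
    exact PySem.Dict.nodup_keys_foldl_insert_key paths Prod.fst (fun _ p => p.2) _ (by simp [PySem.Dict.empty, PySem.Dict.keys])
  set pk : String → Int := fun k => d.getD k 0 with hpk
  have hitems : d.items = d.keys.map (fun k => (k, pk k)) := PySem.Dict.items_eq_map_keys d hnd 0
  -- split the A-side pair fold
  rw [show (fun (st : List Int × PySem.Dict Int (List String)) pp =>
        (st.1 ++ [pp.2], st.2.modify pp.2 [] (· ++ [pp.1])))
      = (fun (st : List Int × PySem.Dict Int (List String)) (pp : String × Int) =>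
        ((fun l (pp : String × Int) => l ++ [pp.2]) st.1 pp,
         (fun b (pp : String × Int) => PySem.Dict.modify b pp.2 [] (· ++ [pp.1])) st.2 pp)) from rfl,
    PySem.List.foldl_prod_mk (fun l (pp : String × Int) => l ++ [pp.2])
      (fun b (pp : String × Int) => PySem.Dict.modify b pp.2 [] (· ++ [pp.1])) d.items [] PySem.Dict.empty]
  simp only
  rw [PySem.List.foldl_append_singleton_eq_map, List.nil_append]
  -- the bucket dictionary lookups
  have hbucket : ∀ v : Int,
      (d.items.foldl (fun b (pp : String × Int) => PySem.Dict.modify b pp.2 [] (· ++ [pp.1])) PySem.Dict.empty).getD v []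
        = (d.keys.filter (fun k => pk k == v)).map id := by
    intro v
    rw [show d.items.foldl (fun b (pp : String × Int) => PySem.Dict.modify b pp.2 [] (· ++ [pp.1])) PySem.Dict.empty
        = ((d.items.map (fun pp => (pp.2, pp.1))).foldl (fun b p => PySem.Dict.modify b p.1 [] (· ++ [p.2])) PySem.Dict.empty) from by
      rw [List.foldl_map]]
    rw [PySem.Dict.getD_foldl_modify_append]
    simp [hitems, List.filter_map, Function.comp_def]
  -- the A-side flat fold
  rw [PySem.List.foldl_append_eq_flatMap, List.nil_append, List.reverse_flatMap]
  -- B side as blocks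
  rw [sorted_rev_eq_blocks]
  -- the popularity lists agree
  have hkeys : d.items.map (fun pp => pp.2) = d.keys.map pk := by
    simp [hitems]
  have hP : PySem.List.sorted (PySem.Set.ofList ((PySem.List.sorted d.keys packageName).map pk)) (fun v => v)
      = PySem.List.sorted (PySem.Set.ofList (d.items.map (fun pp => pp.2))) (fun v => v) := by
    apply lt_ext _ _ (PySem.List.sorted_ofList_pairwise_lt _) (PySem.List.sorted_ofList_pairwise_lt _)
    intro v
    simp [PySem.List.mem_sorted, PySem.Set.mem_ofList, hkeys]
  rw [hP]
  apply flatMap_congr_mem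
  intro v _
  rw [sorted_filter]
  simp only [Function.comp, List.reverse_reverse]
  rw [hbucket v, List.map_id]

-- ===== VERDICT (by name: the statement is the Claim_ definition above) =====
theorem order_by_popularity_spec : Claim_equal_order_by_popularity := by
  intro paths _
  unfold Spec_order_by_popularity
  exact ports_eq paths
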